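-- pv_equiv track=rewrite | github.com/weak-head/leetcode | leetcode/p1153_string_transforms_into_another_string.py | canConvert
-- ===== SOURCE A (Python) =====
-- def canConvert(str1: str, str2: str) -> bool:
--     """
--     Time: O(n)
--     Space: O(n)
--         n - number of characters in the string
--     """
--     if str1 == str2:
--         return True
--
--     conversions = {}
--     for c1, c2 in zip(str1, str2):
--         # We can have only 1 to 1 mapping,
--         # otherwise we can't convert
--         if conversions.setdefault(c1, c2) != c2:
--             return False
--
--     # We need to have 1 unused character in 'str2',
--     # otherwise we can't covert
--     return len(set(str2)) < 26
-- ===== SOURCE B (Python) =====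
-- def canConvert(str1: str, str2: str) -> bool:
--     if str1 == str2:
--         return True
--     n = min(len(str1), len(str2))
--     # brute force: the induced mapping is a function iff no two positions conflict
--     for i in range(n):
--         for j in range(i + 1, n):
--             if str1[i] == str1[j] and str2[i] != str2[j]:
--                 return False
--     return len(set(str2)) < 26
-- ===== Notes on version B (the rewrite author's own statement) =====
-- stated objective: alternative
-- what changed: Replaces A's dict(setdefault) single pass with a brute-force double loop over all index pairs that checks no two positions carry the same source character with different target characters; no mapping table is built at all.
import Mathlib
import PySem

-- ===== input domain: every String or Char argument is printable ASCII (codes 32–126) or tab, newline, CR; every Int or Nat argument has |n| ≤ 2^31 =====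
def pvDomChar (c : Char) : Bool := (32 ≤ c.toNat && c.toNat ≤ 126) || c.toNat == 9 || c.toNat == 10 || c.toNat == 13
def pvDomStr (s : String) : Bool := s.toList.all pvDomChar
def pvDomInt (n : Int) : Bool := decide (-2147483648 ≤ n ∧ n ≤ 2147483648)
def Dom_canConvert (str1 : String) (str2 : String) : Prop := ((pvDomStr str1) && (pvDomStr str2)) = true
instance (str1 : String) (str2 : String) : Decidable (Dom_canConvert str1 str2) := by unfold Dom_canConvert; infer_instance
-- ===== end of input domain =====

-- B replaces A's dict(setdefault) single pass by a brute-force double loop over all index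
-- pairs, checking directly that no two positions conflict (objective: alternative; O(n^2)
-- instead of O(n), no mapping table at all).

-- ===== PORT A =====
-- the 'for c1, c2 in zip(str1, str2)' loop with the dict 'conversions'; on normal exit it
-- returns 'len(set(str2)) < 26'
def canConvertLoop (d : PySem.Dict Char Char) (ps : List (Char × Char)) (str2 : String) : Bool :=
  match ps with
  | [] => decide ((PySem.Set.ofList str2.toList).length < 26)
  | (c1, c2) :: rest =>
    -- conversions.setdefault(c1, c2): returned value, then the updated dict
    let v := (d.get? c1).getD c2
    let d' := d.setdefault c1 c2
    if v ≠ c2 then false else canConvertLoop d' rest str2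

def canConvert (str1 : String) (str2 : String) : Bool :=
  if str1 == str2 then true
  else canConvertLoop PySem.Dict.empty (str1.toList.zip str2.toList) str2

-- ===== PORT B =====
-- nested loops 'for i in range(n): for j in range(i+1, n): …' with early 'return False';
-- indices are always in range, so getD with a dummy default is exact
def canConvert_alt (str1 : String) (str2 : String) : Bool :=
  if str1 == str2 then true
  else
    let s1 := str1.toList
    let s2 := str2.toList
    let n := min s1.length s2.length
    if (List.range n).all (fun i =>
         (List.range' (i + 1) (n - (i + 1))).all (fun j =>
           !(s1.getD i ' ' == s1.getD j ' ' && !(s2.getD i ' ' == s2.getD j ' '))))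
    then decide ((PySem.Set.ofList s2).length < 26)
    else false

-- ===== PRECONDITION & SPEC =====
def Spec_canConvert (str1 : String) (str2 : String) (out : Bool) : Prop := out = canConvert_alt str1 str2
instance (str1 : String) (str2 : String) (out : Bool) : Decidable (Spec_canConvert str1 str2 out) := by unfold Spec_canConvert; infer_instance

-- ===== CLAIM (what is proved, stated in full; the proofs are below) =====
def Claim_equal_canConvert : Prop := ∀ (str1 : String) (str2 : String), Dom_canConvert str1 str2 → Spec_canConvert str1 str2 (canConvert str1 str2)

-- ===== LEMMAS AND PROOFS =====

-- the zipped pair list describes a (partial) function Char → Char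
def FunOK (l : List (Char × Char)) : Prop := ∀ p ∈ l, ∀ q ∈ l, p.1 = q.1 → p.2 = q.2

-- every pair of l is compatible with the mappings already recorded in d
def DictOK (d : PySem.Dict Char Char) (l : List (Char × Char)) : Prop :=
  ∀ p ∈ l, ∀ c, d.get? p.1 = some c → c = p.2

theorem loop_cons_some (d : PySem.Dict Char Char) (c1 c2 v : Char)
    (rest : List (Char × Char)) (str2 : String) (h : d.get? c1 = some v) :
    canConvertLoop d ((c1, c2) :: rest) str2 =
      if v ≠ c2 then false else canConvertLoop d rest str2 := by
  have hc : d.contains c1 = true := by rw [PySem.Dict.contains_eq_isSome_get?, h]; rfl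
  simp only [canConvertLoop, h, Option.getD_some, PySem.Dict.setdefault_of_contains d c2 hc]

theorem loop_cons_none (d : PySem.Dict Char Char) (c1 c2 : Char)
    (rest : List (Char × Char)) (str2 : String) (h : d.get? c1 = none) :
    canConvertLoop d ((c1, c2) :: rest) str2 =
      canConvertLoop (d.insert c1 c2) rest str2 := by
  have hc : d.contains c1 = false := by rw [PySem.Dict.contains_eq_isSome_get?, h]; rfl
  simp only [canConvertLoop, h, Option.getD_none,
    PySem.Dict.setdefault_of_not_contains d c2 hc, ne_eq, not_true_eq_false, if_false]

theorem loop_true (str2 : String) : ∀ (ps : List (Char × Char)) (d : PySem.Dict Char Char),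
    DictOK d ps → FunOK ps →
    canConvertLoop d ps str2 = decide ((PySem.Set.ofList str2.toList).length < 26) := by
  intro ps
  induction ps with
  | nil => intro d _ _; rfl
  | cons hd rest ih =>
    obtain ⟨c1, c2⟩ := hd
    intro d hdict hfun
    have hdr : DictOK d rest := fun p hp => hdict p (List.mem_cons_of_mem _ hp)
    have hfr : FunOK rest := fun p hp q hq e =>
      hfun p (List.mem_cons_of_mem _ hp) q (List.mem_cons_of_mem _ hq) e
    cases h : d.get? c1 with
    | some v =>
      have hv : v = c2 := hdict (c1, c2) List.mem_cons_self v h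
      rw [loop_cons_some d c1 c2 v rest str2 h, if_neg (by simp [hv])]
      exact ih d hdr hfr
    | none =>
      rw [loop_cons_none d c1 c2 rest str2 h]
      apply ih
      · intro p hp c hcget
        by_cases he : p.1 = c1
        · rw [he, PySem.Dict.get?_insert_self] at hcget
          cases hcget
          exact hfun (c1, c2) List.mem_cons_self p (List.mem_cons_of_mem _ hp) he.symm
        · rw [PySem.Dict.get?_insert_of_ne d c2 he] at hcget
          exact hdr p hp c hcget
      · exact hfr

theorem loop_false (str2 : String) : ∀ (ps : List (Char × Char)) (d : PySem.Dict Char Char),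
    ¬ (DictOK d ps ∧ FunOK ps) → canConvertLoop d ps str2 = false := by
  intro ps
  induction ps with
  | nil =>
    intro d hbad
    exact absurd ⟨fun p hp => absurd hp List.not_mem_nil,
                  fun p hp => absurd hp List.not_mem_nil⟩ hbad
  | cons hd rest ih =>
    obtain ⟨c1, c2⟩ := hd
    intro d hbad
    cases h : d.get? c1 with
    | some v =>
      by_cases hv : v = c2
      · rw [loop_cons_some d c1 c2 v rest str2 h, if_neg (by simp [hv])]
        apply ih
        rintro ⟨hdict, hfun⟩
        apply hbad
        constructor
        · intro p hp c hcget
          rcases List.mem_cons.1 hp with rfl | hp'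
          · rw [show ((c1, c2) : Char × Char).1 = c1 from rfl, h] at hcget
            cases hcget; exact hv
          · exact hdict p hp' c hcget
        · intro p hp q hq e
          rcases List.mem_cons.1 hp with rfl | hp' <;> rcases List.mem_cons.1 hq with rfl | hq'
          · rfl
          · have hq2 : d.get? q.1 = some v := by rw [← e]; exact h
            exact hv ▸ hdict q hq' v hq2
          · have hp2 : d.get? p.1 = some v := by rw [e]; exact h
            rw [← hdict p hp' v hp2, hv]
          · exact hfun p hp' q hq' e
      · rw [loop_cons_some d c1 c2 v rest str2 h, if_pos (by simp [hv])]
    | none =>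
      rw [loop_cons_none d c1 c2 rest str2 h]
      apply ih
      rintro ⟨hdict, hfun⟩
      apply hbad
      constructor
      · intro p hp c hcget
        rcases List.mem_cons.1 hp with rfl | hp'
        · rw [show ((c1, c2) : Char × Char).1 = c1 from rfl, h] at hcget
          cases hcget
        · by_cases he : p.1 = c1
          · rw [he, h] at hcget; cases hcget
          · exact hdict p hp' c (by rw [PySem.Dict.get?_insert_of_ne d c2 he]; exact hcget)
      · intro p hp q hq e
        rcases List.mem_cons.1 hp with rfl | hp' <;> rcases List.mem_cons.1 hq with rfl | hq'
        · rfl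
        · exact hdict q hq' c2 (by rw [← e]; exact PySem.Dict.get?_insert_self d c1 c2)
        · exact (hdict p hp' c2 (by rw [e]; exact PySem.Dict.get?_insert_self d c1 c2)).symm
        · exact hfun p hp' q hq' e

-- B's nested index scan says exactly that the zipped pairs are a function
theorem nested_iff (s1 s2 : List Char) :
    ((List.range (min s1.length s2.length)).all (fun i =>
      (List.range' (i + 1) (min s1.length s2.length - (i + 1))).all (fun j =>
        !(s1.getD i ' ' == s1.getD j ' ' && !(s2.getD i ' ' == s2.getD j ' '))))) = true
    ↔ FunOK (s1.zip s2) := by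
  set n := min s1.length s2.length with hn
  have hlen : (s1.zip s2).length = n := List.length_zip
  simp only [List.all_eq_true, List.mem_range, List.mem_range'_1, Bool.not_eq_eq_eq_not,
    Bool.not_true, Bool.and_eq_false_imp, Bool.not_false, beq_iff_eq]
  constructor
  · intro h p hp q hq e
    rw [List.mem_iff_getElem] at hp hq
    obtain ⟨k, hk, rfl⟩ := hp
    obtain ⟨m, hm, rfl⟩ := hq
    rw [hlen] at hk hm
    have hk1 : k < s1.length := lt_of_lt_of_le hk (by omega)
    have hk2 : k < s2.length := lt_of_lt_of_le hk (by omega)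
    have hm1 : m < s1.length := lt_of_lt_of_le hm (by omega)
    have hm2 : m < s2.length := lt_of_lt_of_le hm (by omega)
    simp only [List.getElem_zip] at e ⊢
    rcases lt_trichotomy k m with hkm | rfl | hmk
    · have := h k hk m ⟨by omega, by omega⟩
      rw [List.getD_eq_getElem s1 ' ' hk1, List.getD_eq_getElem s1 ' ' hm1,
          List.getD_eq_getElem s2 ' ' hk2, List.getD_eq_getElem s2 ' ' hm2] at this
      exact this e
    · rfl
    · have := h m hm k ⟨by omega, by omega⟩
      rw [List.getD_eq_getElem s1 ' ' hk1, List.getD_eq_getElem s1 ' ' hm1,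
          List.getD_eq_getElem s2 ' ' hk2, List.getD_eq_getElem s2 ' ' hm2] at this
      exact (this e.symm).symm
  · intro h i hi j hj
    have hjn : j < n := by omega
    have hi1 : i < s1.length := lt_of_lt_of_le hi (by omega)
    have hi2 : i < s2.length := lt_of_lt_of_le hi (by omega)
    have hj1 : j < s1.length := lt_of_lt_of_le hjn (by omega)
    have hj2 : j < s2.length := lt_of_lt_of_le hjn (by omega)
    rw [List.getD_eq_getElem s1 ' ' hi1, List.getD_eq_getElem s1 ' ' hj1,
        List.getD_eq_getElem s2 ' ' hi2, List.getD_eq_getElem s2 ' ' hj2]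
    intro e
    have hp : (s1[i], s2[i]) ∈ s1.zip s2 := by
      rw [List.mem_iff_getElem]
      exact ⟨i, by rw [hlen]; exact hi, by rw [List.getElem_zip]⟩
    have hq : (s1[j], s2[j]) ∈ s1.zip s2 := by
      rw [List.mem_iff_getElem]
      exact ⟨j, by rw [hlen]; exact hjn, by rw [List.getElem_zip]⟩
    exact h _ hp _ hq e

-- ===== VERDICT (by name: the statement is the Claim_ definition above) =====
theorem canConvert_spec : Claim_equal_canConvert := by
  intro str1 str2 _
  unfold Spec_canConvert canConvert canConvert_alt
  by_cases heq : (str1 == str2) = true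
  · rw [if_pos heq, if_pos heq]
  · rw [if_neg heq, if_neg heq]
    set s1 := str1.toList
    set s2 := str2.toList
    by_cases hf : FunOK (s1.zip s2)
    · rw [loop_true str2 (s1.zip s2) PySem.Dict.empty
        (fun p _ c hc => by rw [PySem.Dict.get?_empty] at hc; cases hc) hf]
      rw [if_pos ((nested_iff s1 s2).2 hf)]
    · rw [loop_false str2 (s1.zip s2) PySem.Dict.empty (fun hand => hf hand.2)]
      rw [if_neg (fun hall => hf ((nested_iff s1 s2).1 hall))]
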